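-- pv_equiv track=rewrite | github.com/ozoqzm/bigdataprocess | labhw4/lab4_1.py | game369
-- ===== SOURCE A (Python) =====
-- def game369(num):
--     strnum = "" #초기화
--     while num > 0:
--         key = num % 10
--         num //= 10
--         if (key == 3 or key == 6 or key == 9):
--             strnum = "짝" + strnum
--         else:
--             strnum = str(key) + strnum
--     return strnum
-- ===== SOURCE B (Python) =====
-- def game369(num):
--     if num <= 0:
--         return ''
--     return ''.join('짝' if c in '369' else c for c in str(num))
-- ===== Notes on version B (the rewrite author's own statement) =====
-- stated objective: idiomatic
-- what changed: B replaces A's while-loop that extracts digits arithmetically (num % 10, num //= 10) and prepends to the result with a single str(num) conversion and one forward ''.join over the characters, mapping '3'/'6'/'9' to the symbol; non-positive numbers naturally have no digits and yield ''.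
import Mathlib
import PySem

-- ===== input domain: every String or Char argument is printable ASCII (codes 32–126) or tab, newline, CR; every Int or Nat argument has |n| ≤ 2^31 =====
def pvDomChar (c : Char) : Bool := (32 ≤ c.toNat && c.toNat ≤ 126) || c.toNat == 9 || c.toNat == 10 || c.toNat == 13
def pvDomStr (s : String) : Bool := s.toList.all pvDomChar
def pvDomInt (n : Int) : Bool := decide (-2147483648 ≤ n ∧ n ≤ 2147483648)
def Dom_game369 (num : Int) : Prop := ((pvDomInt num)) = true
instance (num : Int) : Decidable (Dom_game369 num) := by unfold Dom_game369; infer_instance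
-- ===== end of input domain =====

-- B replaces A's arithmetic digit extraction with reversed prepending by a single
-- forward map over str(num)'s characters (idiomatic join/comprehension); same values.


-- ===== PORT A =====
def game369Loop (num : Int) (strnum : String) : String :=
  if h : num > 0 then
    let key := PySem.Int.mod num 10
    let num2 := PySem.Int.floordiv num 10
    if key = 3 ∨ key = 6 ∨ key = 9 then
      game369Loop num2 ("짝" ++ strnum)
    else
      game369Loop num2 (PySem.Int.toStr key ++ strnum)
  else strnum
termination_by num.toNat
decreasing_by
  all_goals
    simp only [PySem.Int.floordiv_eq_ediv_of_pos (by norm_num : (0:Int) < 10)]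
    omega

def game369 (num : Int) : String := game369Loop num ""

-- ===== PORT B =====
-- 'c in "369"' on a single character c is membership among the chars '3','6','9' (exact)
def game369MapChar (c : Char) : Char :=
  if c = '3' ∨ c = '6' ∨ c = '9' then '짝' else c

def game369_alt (num : Int) : String :=
  if num ≤ 0 then ""
  else String.ofList ((PySem.Int.toStr num).toList.map game369MapChar)

-- ===== PRECONDITION & SPEC =====
def Spec_game369 (num : Int) (out : String) : Prop := out = game369_alt num
instance (num : Int) (out : String) : Decidable (Spec_game369 num out) := by unfold Spec_game369; infer_instance

-- ===== CLAIM (what is proved, stated in full; the proofs are below) =====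
def Claim_equal_game369 : Prop := ∀ (num : Int), Dom_game369 num → Spec_game369 num (game369 num)

-- ===== LEMMAS AND PROOFS =====

-- Nat.toDigitsCore pulls its accumulator outside
lemma toDigitsCore_append (f : Nat) : ∀ (n : Nat) (acc : List Char),
    Nat.toDigitsCore 10 f n acc = Nat.toDigitsCore 10 f n [] ++ acc := by
  induction f with
  | zero => intro n acc; simp [Nat.toDigitsCore]
  | succ f ih =>
    intro n acc
    simp only [Nat.toDigitsCore]
    by_cases h : n / 10 = 0
    · simp [h]
    · simp only [h]
      rw [ih (n / 10) ((n % 10).digitChar :: acc), ih (n / 10) [(n % 10).digitChar]]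
      simp

-- enough fuel makes toDigitsCore equal to toDigits
lemma toDigitsCore_eq_toDigits : ∀ (n : Nat), ∀ (f : Nat), n < f →
    Nat.toDigitsCore 10 f n [] = Nat.toDigits 10 n := by
  intro n
  induction n using Nat.strong_induction_on with
  | _ n ih =>
    intro f hf
    match f, hf with
    | f + 1, hf =>
      simp only [Nat.toDigits, Nat.toDigitsCore]
      by_cases h : n / 10 = 0
      · simp [h]
      · have hn10 : 10 ≤ n := by
          by_contra hc
          exact h (Nat.div_eq_of_lt (by omega))
        have hlt : n / 10 < n := Nat.div_lt_self (by omega) (by omega)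
        simp only [h]
        rw [toDigitsCore_append f, toDigitsCore_append n,
            ih (n / 10) hlt f (by omega), ih (n / 10) hlt n (by omega)]

-- decimal recursion for Nat.toDigits at base 10
lemma toDigits_ten_rec (n : Nat) (h : 10 ≤ n) :
    Nat.toDigits 10 n = Nat.toDigits 10 (n / 10) ++ [Nat.digitChar (n % 10)] := by
  have h0 : n / 10 ≠ 0 := by
    have := (Nat.one_le_div_iff (by omega : 0 < 10)).mpr h
    omega
  have hlt : n / 10 < n := Nat.div_lt_self (by omega) (by omega)
  conv_lhs => simp only [Nat.toDigits, Nat.toDigitsCore]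
  simp only [h0]
  rw [toDigitsCore_append n, toDigitsCore_eq_toDigits (n / 10) n (by omega)]
  simp

lemma toDigits_lt_ten (n : Nat) (h : n < 10) : Nat.toDigits 10 n = [Nat.digitChar n] := by
  interval_cases n <;> decide

-- B's char map on a single decimal digit
lemma mapChar_digit (m : Nat) (hm : m < 10) :
    game369MapChar (Nat.digitChar m) =
      if m = 3 ∨ m = 6 ∨ m = 9 then '짝' else Nat.digitChar m := by
  interval_cases m <;> decide

lemma toStr_digit (m : Nat) (hm : m < 10) :
    PySem.Int.toStr (m : Int) = String.ofList [Nat.digitChar m] := by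
  apply String.toList_inj.mp
  rw [PySem.Int.toList_toStr, String.toList_ofList]
  simp [PySem.Int.toChars, toDigits_lt_ten m hm]

-- the loop invariant: A's loop computes B's mapped digit string, prepended to the accumulator
lemma game369Loop_eq (k : Nat) (hk : 0 < k) : ∀ (acc : String),
    game369Loop (k : Int) acc =
      String.ofList ((Nat.toDigits 10 k).map game369MapChar) ++ acc := by
  induction k using Nat.strong_induction_on with
  | _ k ih =>
    intro acc
    have hpos : (k : Int) > 0 := by exact_mod_cast hk
    rw [game369Loop]
    have hmodc : PySem.Int.mod (k : Int) 10 = ((k % 10 : Nat) : Int) := by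
      exact_mod_cast PySem.Int.mod_natCast k 10
    have hdivc : PySem.Int.floordiv (k : Int) 10 = ((k / 10 : Nat) : Int) := by
      exact_mod_cast PySem.Int.floordiv_natCast k 10
    simp only [dif_pos hpos, hmodc, hdivc]
    have hm : k % 10 < 10 := Nat.mod_lt _ (by omega)
    have hstep : ∀ s : String,
        (if ((k % 10 : Nat) : Int) = 3 ∨ ((k % 10 : Nat) : Int) = 6 ∨ ((k % 10 : Nat) : Int) = 9 then
          game369Loop ((k / 10 : Nat) : Int) ("짝" ++ s)
        else
          game369Loop ((k / 10 : Nat) : Int) (PySem.Int.toStr ((k % 10 : Nat) : Int) ++ s)) =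
        game369Loop ((k / 10 : Nat) : Int)
          (String.ofList [game369MapChar (Nat.digitChar (k % 10))] ++ s) := by
      intro s
      rw [mapChar_digit (k % 10) hm]
      by_cases h369 : k % 10 = 3 ∨ k % 10 = 6 ∨ k % 10 = 9
      · have hI : ((k % 10 : Nat) : Int) = 3 ∨ ((k % 10 : Nat) : Int) = 6 ∨ ((k % 10 : Nat) : Int) = 9 := by
          rcases h369 with h | h | h <;> simp [h]
        rw [if_pos hI, if_pos h369]
      · have hI : ¬(((k % 10 : Nat) : Int) = 3 ∨ ((k % 10 : Nat) : Int) = 6 ∨ ((k % 10 : Nat) : Int) = 9) := by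
          omega
        rw [if_neg hI, if_neg h369, toStr_digit (k % 10) hm]
    rw [hstep]
    by_cases hsmall : k < 10
    · have hdiv : k / 10 = 0 := Nat.div_eq_of_lt hsmall
      have hmod : k % 10 = k := Nat.mod_eq_of_lt hsmall
      rw [hdiv, hmod]
      rw [game369Loop]
      simp [toDigits_lt_ten k hsmall]
    · have hdivpos : 0 < k / 10 := Nat.div_pos (by omega) (by omega)
      have hlt : k / 10 < k := Nat.div_lt_self (by omega) (by omega)
      rw [ih (k / 10) hlt hdivpos]
      rw [toDigits_ten_rec k (by omega)]
      simp [String.ofList_append, String.append_assoc]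

-- ===== VERDICT (by name: the statement is the Claim_ definition above) =====
theorem game369_spec : Claim_equal_game369 := by
  intro num _
  unfold Spec_game369 game369 game369_alt
  by_cases hle : num ≤ 0
  · rw [game369Loop]
    simp [hle, not_lt.mpr hle]
  · have hpos : 0 < num := lt_of_not_ge hle
    obtain ⟨k, hk⟩ : ∃ k : Nat, num = (k : Int) := ⟨num.toNat, (Int.toNat_of_nonneg (le_of_lt hpos)).symm⟩
    subst hk
    have hk0 : 0 < k := by exact_mod_cast hpos
    rw [if_neg hle, game369Loop_eq k hk0 ""]
    apply String.toList_inj.mp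
    rw [PySem.Int.toList_toStr]
    simp [PySem.Int.toChars, not_lt.mpr (by positivity : (0:Int) ≤ (k:Int))]
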